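-- pv_equiv track=rewrite | github.com/Aubrey2501/Python-Tasks | Module20/03_function/main.py | slicer
-- ===== SOURCE A (Python) =====
-- def slicer(prime, symbol):
--     new_tuple = tuple()
--     if symbol in prime:
--         new_tuple = prime[prime.index(symbol):]
--         for index, i_sym in enumerate(new_tuple):
--             if i_sym == symbol and index != 0:
--                 new_tuple = new_tuple[:index + 1]
--                 break
--     return new_tuple
-- ===== SOURCE B (Python) =====
-- def slicer(prime, symbol):
--     first = None
--     for i, x in enumerate(prime):
--         if x == symbol:
--             if first is None:
--                 first = i
--             else:
--                 return prime[first:i + 1]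
--     return prime[first:] if first is not None else ()
-- ===== Notes on version B (the rewrite author's own statement) =====
-- stated objective: alternative
-- what changed: B finds both occurrence boundaries in one enumerate pass with an Optional first-index accumulator and returns as soon as the second match is seen, instead of A's membership test + .index() rescan + a separate loop over the tail.
import Mathlib
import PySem

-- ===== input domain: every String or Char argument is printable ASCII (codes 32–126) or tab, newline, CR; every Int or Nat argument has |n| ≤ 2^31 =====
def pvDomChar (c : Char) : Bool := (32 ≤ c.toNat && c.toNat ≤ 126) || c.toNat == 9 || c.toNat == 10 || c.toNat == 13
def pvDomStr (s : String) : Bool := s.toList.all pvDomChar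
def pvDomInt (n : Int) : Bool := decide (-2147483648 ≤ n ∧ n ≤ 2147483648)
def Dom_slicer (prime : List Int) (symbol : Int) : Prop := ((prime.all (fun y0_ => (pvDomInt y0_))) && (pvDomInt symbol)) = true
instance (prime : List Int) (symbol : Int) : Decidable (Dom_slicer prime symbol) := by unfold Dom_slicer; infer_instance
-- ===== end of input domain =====

-- B does one enumerate pass keeping the first match index, returning on the second match; A does `in` + .index() + a scan of the tail. Return values only (A builds fresh tuples, no mutation).

-- ===== PORT A =====
-- the `for index, i_sym in enumerate(new_tuple)` loop with its break:
-- scans `rest` (the unvisited part of nt) with the running enumerate index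
def slicerLoopA (symbol : Int) (nt : List Int) : List Int → Nat → List Int
  | [], _ => nt
  | x :: rest, idx =>
      if x = symbol ∧ idx ≠ 0 then nt.take (idx + 1)   -- new_tuple[:index+1]; break
      else slicerLoopA symbol nt rest (idx + 1)

def slicer (prime : List Int) (symbol : Int) : List Int :=
  if symbol ∈ prime then
    -- prime[prime.index(symbol):]; index() is guarded by `symbol in prime`, so .getD 0 is never used
    let nt := prime.drop ((PySem.List.index? prime symbol).getD 0)
    slicerLoopA symbol nt nt 0
  else []

-- ===== PORT B =====
-- one pass: i is the enumerate index, first the index of the first match (None until seen)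
def slicerLoopB (prime : List Int) (symbol : Int) : List Int → Nat → Option Nat → List Int
  | [], _, none => []                                   -- symbol never found: ()
  | [], _, some f => prime.drop f                       -- prime[first:]
  | x :: rest, i, first =>
      if x = symbol then
        match first with
        | none => slicerLoopB prime symbol rest (i + 1) (some i)
        | some f => (prime.drop f).take (i + 1 - f)     -- prime[first:i+1], 0 ≤ f ≤ i
      else slicerLoopB prime symbol rest (i + 1) first

def slicer_alt (prime : List Int) (symbol : Int) : List Int :=
  slicerLoopB prime symbol prime 0 none

-- ===== PRECONDITION & SPEC =====
def Spec_slicer (prime : List Int) (symbol : Int) (out : List Int) : Prop := out = slicer_alt prime symbol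
instance (prime : List Int) (symbol : Int) (out : List Int) : Decidable (Spec_slicer prime symbol out) := by unfold Spec_slicer; infer_instance

-- ===== CLAIM (what is proved, stated in full; the proofs are below) =====
def Claim_equal_slicer : Prop := ∀ (prime : List Int) (symbol : Int), Dom_slicer prime symbol → Spec_slicer prime symbol (slicer prime symbol)

-- ===== LEMMAS AND PROOFS =====

-- prepending a non-matching element shifts B's loop state by one
theorem slicerLoopB_shift (y : Int) (prime : List Int) (symbol : Int) :
    ∀ (r : List Int) (i : Nat) (first : Option Nat),
      slicerLoopB (y :: prime) symbol r (i + 1) (first.map (· + 1)) =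
      slicerLoopB prime symbol r i first := by
  intro r
  induction r with
  | nil => intro i first; cases first <;> simp [slicerLoopB]
  | cons x rest ih =>
      intro i first
      by_cases hx : x = symbol
      · cases first with
        | none => simpa [slicerLoopB, hx] using ih (i + 1) (some i)
        | some f =>
            simp [slicerLoopB, hx, Nat.succ_sub_succ]
      · simp only [slicerLoopB, if_neg hx]
        exact ih (i + 1) first

-- after the first match at f, A's tail scan and B's continued scan agree
theorem loop_eq (prime : List Int) (symbol : Int) (f : Nat) :
    ∀ (r : List Int) (j : Nat), 1 ≤ j →
      slicerLoopA symbol (prime.drop f) r j =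
      slicerLoopB prime symbol r (f + j) (some f) := by
  intro r
  induction r with
  | nil => intro j hj; simp [slicerLoopA, slicerLoopB]
  | cons x rest ih =>
      intro j hj
      by_cases hx : x = symbol
      · have h1 : f + j + 1 - f = j + 1 := by omega
        have h2 : j ≠ 0 := by omega
        simp [slicerLoopA, slicerLoopB, hx, h2, h1]
      · simp only [slicerLoopA, slicerLoopB, hx]
        simpa [hx, Nat.add_assoc] using ih (j + 1) (by omega)

theorem slicer_eq_alt (prime : List Int) (symbol : Int) :
    slicer prime symbol = slicer_alt prime symbol := by
  induction prime with
  | nil => simp [slicer, slicer_alt, slicerLoopB]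
  | cons x xs ih =>
      by_cases hx : x = symbol
      · subst hx
        simp only [slicer, List.mem_cons, true_or, if_true,
          PySem.List.index?_cons_self, Option.getD_some, List.drop_zero]
        simp only [slicer_alt, slicerLoopB]
        have h0 : slicerLoopA x (x :: xs) (x :: xs) 0 = slicerLoopA x (x :: xs) xs 1 := by
          simp [slicerLoopA]
        rw [h0]
        have := loop_eq (x :: xs) x 0 xs 1 (by omega)
        simpa using this
      · have hmem : symbol ∈ x :: xs ↔ symbol ∈ xs := by
          simp [List.mem_cons, Ne.symm hx]
        have halt : slicer_alt (x :: xs) symbol = slicer_alt xs symbol := by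
          simp only [slicer_alt, slicerLoopB, if_neg hx]
          have := slicerLoopB_shift x xs symbol xs 0 none
          simpa using this
        rw [halt, ← ih]
        by_cases hm : symbol ∈ xs
        · simp only [slicer, if_pos (hmem.mpr hm), if_pos hm]
          rw [PySem.List.index?_cons_of_ne xs hx]
          obtain ⟨i, hi⟩ := Option.isSome_iff_exists.mp (List.isSome_idxOf?.mpr hm)
          simp [hi, List.drop_succ_cons]
        · simp [slicer, hm, hmem.not.mpr hm]

-- ===== VERDICT (by name: the statement is the Claim_ definition above) =====
theorem slicer_spec : Claim_equal_slicer := by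
  intro prime symbol _
  exact slicer_eq_alt prime symbol
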